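-- pv_equiv track=rewrite | github.com/sunxiangrong/agent-swarm-hub | src/agent_swarm_hub/adapter.py | _project_focus
-- ===== SOURCE A (Python) =====
-- def _project_focus(summary: str | None) -> str:
--     text = (summary or "").strip()
--     if not text:
--         return ""
--     for line in text.splitlines():
--         stripped = line.strip()
--         if stripped.startswith("Current focus:"):
--             return stripped.removeprefix("Current focus:").strip()
--     for line in text.splitlines():
--         stripped = line.strip()
--         if stripped.startswith("Recent context:"):
--             return stripped.removeprefix("Recent context:").strip()
--     return ""
-- ===== SOURCE B (Python) =====
-- def _project_focus(summary: str | None) -> str: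
--     context = None
--     for line in (summary or "").strip().splitlines():
--         s = line.strip()
--         if s.startswith("Current focus:"):
--             return s[len("Current focus:"):].strip()
--         if context is None and s.startswith("Recent context:"):
--             context = s[len("Recent context:"):].strip()
--     return context if context is not None else ""
-- ===== Notes on version B (the rewrite author's own statement) =====
-- stated objective: simpler
-- what changed: Replaces A's two separate scans of the lines (focus first, then context) by a single pass that returns on the first 'Current focus:' line and remembers the first 'Recent context:' line as a fallback.
import Mathlib
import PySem

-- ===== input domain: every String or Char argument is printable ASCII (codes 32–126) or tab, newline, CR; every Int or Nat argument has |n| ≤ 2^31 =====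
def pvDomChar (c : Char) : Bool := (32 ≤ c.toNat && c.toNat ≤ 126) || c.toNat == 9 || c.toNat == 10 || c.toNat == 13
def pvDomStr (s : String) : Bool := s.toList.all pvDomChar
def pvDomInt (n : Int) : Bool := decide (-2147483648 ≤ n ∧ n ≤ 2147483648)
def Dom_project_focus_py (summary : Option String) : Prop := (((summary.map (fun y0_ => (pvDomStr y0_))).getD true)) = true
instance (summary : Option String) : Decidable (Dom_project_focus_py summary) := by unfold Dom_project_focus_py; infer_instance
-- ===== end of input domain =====

-- B makes one pass over the lines (first focus returns immediately, first context kept as fallback)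
-- instead of A's two scans; same return value, no speed claim.

-- ===== PORT A =====
-- str.removeprefix(p): drop p if it is a prefix, else unchanged (exact port, hand-written)
def pyRemoveprefix (s p : String) : String :=
  if PySem.Str.startswith s p then String.mk (s.toList.drop p.toList.length) else s

-- first loop of A: return stripped suffix of the first 'Current focus:' line
def aFocusScan : List String → Option String
  | [] => none
  | l :: rest =>
    let stripped := PySem.Str.strip l
    if PySem.Str.startswith stripped "Current focus:" then
      some (PySem.Str.strip (pyRemoveprefix stripped "Current focus:"))
    else aFocusScan rest

-- second loop of A: same for 'Recent context:'
def aContextScan : List String → Option String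
  | [] => none
  | l :: rest =>
    let stripped := PySem.Str.strip l
    if PySem.Str.startswith stripped "Recent context:" then
      some (PySem.Str.strip (pyRemoveprefix stripped "Recent context:"))
    else aContextScan rest

def project_focus_py (summary : Option String) : String :=
  let text := PySem.Str.strip (summary.getD "")
  if text = "" then ""
  else
    match aFocusScan (PySem.Str.splitlines text) with
    | some r => r
    | none =>
      match aContextScan (PySem.Str.splitlines text) with
      | some r => r
      | none => ""

-- ===== PORT B =====
-- single pass, carrying the first 'Recent context:' value as fallback
-- (s[14:] / s[15:] on a string known to start with the 14-/15-char prefix = drop; exact for this nonnegative slice)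
def bLoop : List String → Option String → String
  | [], ctx => ctx.getD ""
  | l :: rest, ctx =>
    let s := PySem.Str.strip l
    if PySem.Str.startswith s "Current focus:" then
      PySem.Str.strip (String.mk (s.toList.drop 14))
    else if ctx.isNone && PySem.Str.startswith s "Recent context:" then
      bLoop rest (some (PySem.Str.strip (String.mk (s.toList.drop 15))))
    else bLoop rest ctx

def project_focus_py_alt (summary : Option String) : String :=
  bLoop (PySem.Str.splitlines (PySem.Str.strip (summary.getD ""))) none

-- ===== PRECONDITION & SPEC =====
def Spec_project_focus_py (summary : Option String) (out : String) : Prop := out = project_focus_py_alt summary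
instance (summary : Option String) (out : String) : Decidable (Spec_project_focus_py summary out) := by unfold Spec_project_focus_py; infer_instance

-- ===== CLAIM (what is proved, stated in full; the proofs are below) =====
def Claim_equal_project_focus_py : Prop := ∀ (summary : Option String), Dom_project_focus_py summary → Spec_project_focus_py summary (project_focus_py summary)

-- ===== LEMMAS AND PROOFS =====

theorem removeprefix_focus (s : String)
    (h : PySem.Str.startswith s "Current focus:" = true) :
    pyRemoveprefix s "Current focus:" = String.mk (s.toList.drop 14) := by
  simp at h; simp [pyRemoveprefix, h]

theorem removeprefix_context (s : String)
    (h : PySem.Str.startswith s "Recent context:" = true) :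
    pyRemoveprefix s "Recent context:" = String.mk (s.toList.drop 15) := by
  simp at h; simp [pyRemoveprefix, h]

-- a started fallback is final: the pass returns the first focus value, else the carried context
theorem bLoop_some (lines : List String) (c : String) :
    bLoop lines (some c) = (aFocusScan lines).getD c := by
  induction lines with
  | nil => rfl
  | cons l rest ih =>
    simp only [bLoop, aFocusScan]
    by_cases h : PySem.Str.startswith (PySem.Str.strip l) "Current focus:" = true
    · have h' := h; simp at h'
      simp [h', removeprefix_focus _ h]
    · have h' := h; simp at h'
      simp [h', ih]

-- the single pass computes A's two-scan result
theorem bLoop_none (lines : List String) :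
    bLoop lines none = (aFocusScan lines).getD ((aContextScan lines).getD "") := by
  induction lines with
  | nil => rfl
  | cons l rest ih =>
    simp only [bLoop, aFocusScan, aContextScan]
    by_cases hf : PySem.Str.startswith (PySem.Str.strip l) "Current focus:" = true
    · have hf' := hf; simp at hf'
      simp [hf', removeprefix_focus _ hf]
    · by_cases hc : PySem.Str.startswith (PySem.Str.strip l) "Recent context:" = true
      · have hc' := hc; simp at hf hc'
        simp [hf, hc', removeprefix_context _ hc, bLoop_some]
      · simp at hf hc
        simp [hf, hc, ih]

-- ===== VERDICT (by name: the statement is the Claim_ definition above) =====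
theorem project_focus_py_spec : Claim_equal_project_focus_py := by
  intro summary _
  unfold Spec_project_focus_py project_focus_py project_focus_py_alt
  by_cases h : PySem.Str.strip (summary.getD "") = ""
  · simp only [h]
    have : PySem.Str.splitlines "" = [] := by decide
    simp [this, bLoop]
  · simp only [h, if_neg h, bLoop_none]
    rcases hf : aFocusScan (PySem.Str.splitlines (PySem.Str.strip (summary.getD ""))) with _ | r
    · rcases hc : aContextScan (PySem.Str.splitlines (PySem.Str.strip (summary.getD ""))) with _ | r'
      · simp [hf, hc]
      · simp [hf, hc]
    · simp [hf]
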